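-- pv_equiv track=rewrite | github.com/Mackenzie2021/Coding---GitHub | ITMGT Assignments/mod-4-ipa-1.py | eta
-- ===== SOURCE A (Python) =====
-- def eta(first_stop, second_stop, route_map):
--     '''ETA.
--     25 points.
--
--     A shuttle van service is tasked to travel along a predefined circlar route.
--     This route is divided into several legs between stops.
--     The route is one-way only, and it is fully connected to itself.
--
--     This function returns how long it will take the shuttle to arrive at a stop
--     after leaving another stop.
--
--     Please see "mod-4-ipa-1-sample-data.py" for sample data. The route map will
--     adhere to the same pattern. The route map may contain more legs and more stops,
--     but it will always be one-way and fully enclosed.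
--
--     Parameters
--     ----------
--     first_stop: str
--         the stop that the shuttle will leave
--     second_stop: str
--         the stop that the shuttle will arrive at
--     route_map: dict
--         the data describing the routes
--
--     Returns
--     -------
--     int
--         the time it will take the shuttle to travel from first_stop to second_stop
--     '''
--     # Replace `pass` with your code.
--     # Stay within the function. Only use the parameters as input. The function should return your answer.
--     to_from = list(route_map.keys())
--     from_stop_1 = [x for x in zip(*to_from)][0]
--     to_stop_1 = [x for x in zip(*to_from)][1]
--     index_from = int(from_stop_1.index(first_stop))
--     index_to = int(to_stop_1.index(second_stop))
--
--     time_values = []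
--
--     if first_stop == second_stop:
--         return (0)
--
--     elif index_from > index_to:
--         for i in range(index_from,len(to_from)):
--             time_values.append(route_map[to_from[i]]["travel_time_mins"])
--         for i in range(0,index_to + 1):
--             time_values.append(route_map[to_from[i]]["travel_time_mins"])
--         return sum(time_values)
--
--     elif index_from < index_to:
--         for i in range(index_from,index_to + 1):
--             time_values.append(route_map[to_from[i]]["travel_time_mins"])
--         return sum(time_values)
--
--     elif index_from == index_to:
--         time_values.append(route_map[to_from[index_from]]["travel_time_mins"])
--         return sum(time_values)
-- ===== SOURCE B (Python) =====
-- def eta(first_stop, second_stop, route_map):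
--     keys = list(route_map.keys())
--     froms = [k[0] for k in keys]
--     tos = [k[1] for k in keys]
--     i = froms.index(first_stop)
--     j = tos.index(second_stop)
--     if first_stop == second_stop:
--         return 0
--     # rotate the route so it starts at the departure leg, then sum the prefix
--     rotated = keys[i:] + keys[:i]
--     legs = rotated[: (j - i) % len(keys) + 1]
--     return sum(route_map[k]["travel_time_mins"] for k in legs)
-- ===== Notes on version B (the rewrite author's own statement) =====
-- stated objective: simpler
-- what changed: Replaces the three-way index case analysis (two loops for the wrap-around case) by rotating the key list so it starts at the departure leg and summing one modular-length prefix slice.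
import Mathlib
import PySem

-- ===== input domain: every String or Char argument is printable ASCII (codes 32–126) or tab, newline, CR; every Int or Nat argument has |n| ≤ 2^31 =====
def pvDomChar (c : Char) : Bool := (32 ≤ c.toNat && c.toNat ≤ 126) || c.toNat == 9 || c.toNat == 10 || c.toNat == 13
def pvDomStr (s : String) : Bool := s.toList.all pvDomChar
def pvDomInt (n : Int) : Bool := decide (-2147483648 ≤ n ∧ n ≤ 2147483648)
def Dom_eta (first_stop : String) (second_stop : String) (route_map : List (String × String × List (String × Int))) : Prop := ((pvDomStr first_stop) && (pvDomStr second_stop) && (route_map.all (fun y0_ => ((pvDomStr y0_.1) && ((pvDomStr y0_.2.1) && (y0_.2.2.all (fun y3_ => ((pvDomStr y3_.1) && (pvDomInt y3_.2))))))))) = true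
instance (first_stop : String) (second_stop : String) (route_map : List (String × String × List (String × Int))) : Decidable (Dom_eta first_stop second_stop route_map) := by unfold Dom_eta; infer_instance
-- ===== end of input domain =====

-- B replaces A's three-way index case analysis by rotating the key list to start at the
-- departure leg and summing one modular-length prefix slice (objective: simpler).

-- ===== PORT A =====
-- Marshalling of the Python dict argument {(from, to): {field: int}} into PySem.Dict
-- (Python dict semantics: first-occurrence order, last value wins).
def pvRouteDictA (route_map : List (String × String × List (String × Int))) :
    PySem.Dict (String × String) (PySem.Dict String Int) :=
  PySem.Dict.ofList (route_map.map (fun x => ((x.1, x.2.1), PySem.Dict.ofList x.2.2)))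

-- route_map[k]["travel_time_mins"]; the defaults are dead under Pre_eta (Python raises there)
def pvTravelA (d : PySem.Dict (String × String) (PySem.Dict String Int)) (k : String × String) : Int :=
  PySem.Dict.getD (PySem.Dict.getD d k PySem.Dict.empty) "travel_time_mins" 0

def eta (first_stop : String) (second_stop : String) (route_map : List (String × String × List (String × Int))) : Int :=
  let d := pvRouteDictA route_map
  let to_from := PySem.Dict.keys d
  let from_stop_1 := to_from.map Prod.fst
  let to_stop_1 := to_from.map Prod.snd
  match PySem.List.index? from_stop_1 first_stop, PySem.List.index? to_stop_1 second_stop with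
  | some index_from, some index_to =>
    if first_stop = second_stop then 0
    else if index_from > index_to then
      (((List.range' index_from (to_from.length - index_from)) ++ List.range (index_to + 1)).map
        (fun i => pvTravelA d (to_from.getD i ("", "")))).sum
    else if index_from < index_to then
      ((List.range' index_from (index_to + 1 - index_from)).map
        (fun i => pvTravelA d (to_from.getD i ("", "")))).sum
    else
      ([pvTravelA d (to_from.getD index_from ("", ""))]).sum
  | _, _ => 0   -- .index raised ValueError (or the map was empty): outside Pre_eta

-- ===== PORT B =====
-- B's own copies of the input marshalling / field lookup (not shared with port A)
def pvRouteDictB (route_map : List (String × String × List (String × Int))) :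
    PySem.Dict (String × String) (PySem.Dict String Int) :=
  PySem.Dict.ofList (route_map.map (fun x => ((x.1, x.2.1), PySem.Dict.ofList x.2.2)))

def pvTravelB (d : PySem.Dict (String × String) (PySem.Dict String Int)) (k : String × String) : Int :=
  PySem.Dict.getD (PySem.Dict.getD d k PySem.Dict.empty) "travel_time_mins" 0

def eta_alt (first_stop : String) (second_stop : String) (route_map : List (String × String × List (String × Int))) : Int :=
  let d := pvRouteDictB route_map
  let keys := PySem.Dict.keys d
  let froms := keys.map Prod.fst
  let tos := keys.map Prod.snd
  match PySem.List.index? froms first_stop with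
  | none => 0   -- .index raised ValueError: outside Pre_eta
  | some i =>
    match PySem.List.index? tos second_stop with
    | none => 0   -- .index raised ValueError: outside Pre_eta
    | some j =>
      if first_stop = second_stop then 0
      else
        -- keys[i:] + keys[:i]  (slices at a Nat index 0 ≤ i < len are exactly drop/take)
        let rotated := keys.drop i ++ keys.take i
        let legs := rotated.take ((PySem.Int.mod ((j : Int) - (i : Int)) (keys.length : Int)).toNat + 1)
        (legs.map (fun k => pvTravelB d k)).sum

-- ===== PRECONDITION & SPEC =====
-- Pre's own copy of the dict marshalling (reaches neither port)
def pvRouteDictP (route_map : List (String × String × List (String × Int))) :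
    PySem.Dict (String × String) (PySem.Dict String Int) :=
  PySem.Dict.ofList (route_map.map (fun x => ((x.1, x.2.1), PySem.Dict.ofList x.2.2)))

-- Pre_eta excludes exactly the inputs where Python A raises: ValueError from .index when a stop is
-- missing (this also covers the IndexError on an empty map), and KeyError when a leg on the
-- travelled arc (the wrapping index interval from the departure leg to the arrival leg, read only
-- when the stops differ) has no "travel_time_mins" entry.
def Pre_eta (first_stop : String) (second_stop : String) (route_map : List (String × String × List (String × Int))) : Prop :=
  first_stop ∈ (PySem.Dict.keys (pvRouteDictP route_map)).map Prod.fst ∧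
  second_stop ∈ (PySem.Dict.keys (pvRouteDictP route_map)).map Prod.snd ∧
  (first_stop ≠ second_stop →
    ∀ k, k < (PySem.Dict.keys (pvRouteDictP route_map)).length →
      (if ((PySem.Dict.keys (pvRouteDictP route_map)).map Prod.fst).idxOf first_stop
          ≤ ((PySem.Dict.keys (pvRouteDictP route_map)).map Prod.snd).idxOf second_stop
       then ((PySem.Dict.keys (pvRouteDictP route_map)).map Prod.fst).idxOf first_stop ≤ k ∧
            k ≤ ((PySem.Dict.keys (pvRouteDictP route_map)).map Prod.snd).idxOf second_stop
       else ((PySem.Dict.keys (pvRouteDictP route_map)).map Prod.fst).idxOf first_stop ≤ k ∨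
            k ≤ ((PySem.Dict.keys (pvRouteDictP route_map)).map Prod.snd).idxOf second_stop) →
      PySem.Dict.contains
        (PySem.Dict.getD (pvRouteDictP route_map)
          ((PySem.Dict.keys (pvRouteDictP route_map)).getD k ("", "")) PySem.Dict.empty)
        "travel_time_mins" = true)
instance (first_stop : String) (second_stop : String) (route_map : List (String × String × List (String × Int))) : Decidable (Pre_eta first_stop second_stop route_map) := by unfold Pre_eta; infer_instance

def pvWitness_eta : String × String × (List (String × String × List (String × Int))) :=
  ("a", "b", [("a", "b", [("travel_time_mins", 5)]), ("b", "a", [("travel_time_mins", 7)])])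

def Spec_eta (first_stop : String) (second_stop : String) (route_map : List (String × String × List (String × Int))) (out : Int) : Prop := out = eta_alt first_stop second_stop route_map
instance (first_stop : String) (second_stop : String) (route_map : List (String × String × List (String × Int))) (out : Int) : Decidable (Spec_eta first_stop second_stop route_map out) := by unfold Spec_eta; infer_instance

-- ===== CLAIM (what is proved, stated in full; the proofs are below) =====
def Claim_equal_eta : Prop := ∀ (first_stop : String) (second_stop : String) (route_map : List (String × String × List (String × Int))), Dom_eta first_stop second_stop route_map → Pre_eta first_stop second_stop route_map → Spec_eta first_stop second_stop route_map (eta first_stop second_stop route_map)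

-- ===== LEMMAS AND PROOFS =====

-- mapping f over the elements indexed by range' a c is mapping f over the slice l[a : a+c]
theorem map_f_getD_range' {α β : Type} (f : α → β) (dflt : α) :
    ∀ (c a : Nat) (l : List α), a + c ≤ l.length →
      (List.range' a c).map (fun i => f (l.getD i dflt)) = ((l.drop a).take c).map f := by
  intro c
  induction c with
  | zero => intro a l _; simp
  | succ c ih =>
    intro a l h
    have ha : a < l.length := by omega
    rw [List.range'_succ, List.map_cons, List.drop_eq_getElem_cons ha]
    rw [List.take_succ_cons, List.map_cons, List.getD_eq_getElem l dflt ha]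
    have := ih (a + 1) l (by omega)
    rw [this]

theorem eta_eq_alt (first_stop : String) (second_stop : String)
    (route_map : List (String × String × List (String × Int)))
    (h : Pre_eta first_stop second_stop route_map) :
    eta first_stop second_stop route_map = eta_alt first_stop second_stop route_map := by
  obtain ⟨h1, h2, -⟩ := h
  unfold eta eta_alt
  dsimp only
  rw [show pvRouteDictB = pvRouteDictA from rfl, show pvTravelB = pvTravelA from rfl]
  rw [show pvRouteDictP = pvRouteDictA from rfl] at h1 h2
  set d := pvRouteDictA route_map with hd
  set keys := PySem.Dict.keys d with hkeys
  rw [← PySem.List.index?_isSome_iff] at h1 h2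
  obtain ⟨i, hi⟩ := Option.isSome_iff_exists.mp h1
  obtain ⟨j, hj⟩ := Option.isSome_iff_exists.mp h2
  rw [hi, hj]
  obtain ⟨hilt, -, -⟩ := PySem.List.getElem_of_index?_eq_some hi
  obtain ⟨hjlt, -, -⟩ := PySem.List.getElem_of_index?_eq_some hj
  rw [List.length_map] at hilt hjlt
  by_cases hfs : first_stop = second_stop
  · simp [hfs]
  simp only [hfs, if_false]
  set n := keys.length with hn
  have hn0 : 0 < n := by omega
  have hmod : PySem.Int.mod ((j : Int) - (i : Int)) (n : Int)
      = ((j : Int) - (i : Int)) % (n : Int) :=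
    PySem.Int.mod_eq_emod_of_pos (by exact_mod_cast hn0)
  rcases lt_trichotomy i j with hij | hij | hij
  · -- index_from < index_to
    have : ¬ i > j := by omega
    simp only [this, if_false, hij, if_true]
    have hm : ((j : Int) - (i : Int)) % (n : Int) = ((j : Int) - (i : Int)) :=
      Int.emod_eq_of_lt (by omega) (by omega)
    rw [hmod, hm]
    have htn : ((j : Int) - (i : Int)).toNat + 1 = j + 1 - i := by omega
    rw [htn]
    rw [List.take_append, List.length_drop]
    have : j + 1 - i - (n - i) = 0 := by omega
    rw [this, List.take_zero, List.append_nil]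
    rw [map_f_getD_range' (pvTravelA d) ("", "") (j + 1 - i) i keys (by omega)]
  · -- index_from = index_to
    subst hij
    simp only [lt_irrefl, if_false]
    have hm : ((i : Int) - (i : Int)) % (n : Int) = 0 := by simp
    rw [hmod, hm]
    simp only [Int.toNat_zero, Nat.zero_add]
    rw [List.take_append, List.length_drop]
    have : 1 - (n - i) = 0 := by omega
    rw [this, List.take_zero, List.append_nil]
    have hdi : keys.drop i = keys[i] :: keys.drop (i + 1) := List.drop_eq_getElem_cons hilt
    rw [hdi, List.take_succ_cons, List.take_zero, List.getD_eq_getElem keys ("", "") hilt]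
    simp
  · -- index_from > index_to
    simp only [hij, if_true]
    have hm : ((j : Int) - (i : Int)) % (n : Int) = (j : Int) - (i : Int) + (n : Int) := by
      have : ((j : Int) - (i : Int)) % (n : Int)
          = ((j : Int) - (i : Int) + (n : Int)) % (n : Int) := (Int.add_emod_right _ _).symm
      rw [this, Int.emod_eq_of_lt (by omega) (by omega)]
    rw [hmod, hm]
    have htn : ((j : Int) - (i : Int) + (n : Int)).toNat + 1 = (n - i) + (j + 1) := by omega
    rw [htn]
    rw [List.take_append, List.length_drop]
    have h1' : keys.length - i ≤ n - i + (j + 1) := by omega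
    rw [List.take_of_length_le (by rw [List.length_drop]; omega)]
    have : n - i + (j + 1) - (n - i) = j + 1 := by omega
    rw [this, List.take_take, min_eq_left (by omega)]
    rw [List.map_append, List.sum_append, List.map_append, List.sum_append]
    rw [map_f_getD_range' (pvTravelA d) ("", "") (n - i) i keys (by omega)]
    rw [List.take_of_length_le (by rw [List.length_drop])]
    have hr : List.range (j + 1) = List.range' 0 (j + 1) := List.range_eq_range'
    rw [hr, map_f_getD_range' (pvTravelA d) ("", "") (j + 1) 0 keys (by omega)]
    simp

-- ===== VERDICT (by name: the statement is the Claim_ definition above) =====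
theorem eta_spec : Claim_equal_eta := by
  intro first_stop second_stop route_map _ hpre
  exact eta_eq_alt first_stop second_stop route_map hpre
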